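-- pv_equiv track=rewrite | github.com/Freddsle/ComBatFed | fedcombat/classes/coordinator_utils.py | _calculate_feature_counts
-- ===== SOURCE A (Python) =====
-- from typing import List, Tuple, Union, Dict
--
-- FeatureBatchInfoType = Tuple[
--     str,                               # client name
--     Union[int, None],                  # client position for ordering
--     Union[str, bool, None],            # reference batch flag or identifier (no longer used)
--     Dict[str, List[str]]               # dictionary mapping "<client>|<batch>" to features
-- ]
--
-- def _calculate_feature_counts(feature_batch_info: List[FeatureBatchInfoType]) -> Dict[str, int]:
--     feature_count = {}
--     # Count each feature's presence per client (unique per client).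
--     for client_name, _, _, batch_info in feature_batch_info:
--         client_feature_names = set()
--         for features in batch_info.values():
--             for feature in features:
--                 if feature not in client_feature_names:
--                     feature_count[feature] = feature_count.get(feature, 0) + 1
--                     client_feature_names.add(feature)
--     return feature_count
-- ===== SOURCE B (Python) =====
-- def _calculate_feature_counts(feature_batch_info):
--     # Phase 1: one de-duplicated feature set per client.
--     client_sets = [
--         {f for feats in batch_info.values() for f in feats}
--         for _, _, _, batch_info in feature_batch_info
--     ]
--     # Phase 2: the distinct features in first-appearance order across all clients.
--     order = dict.fromkeys(
--         f
--         for _, _, _, batch_info in feature_batch_info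
--         for feats in batch_info.values()
--         for f in feats
--     )
--     # Phase 3: each feature's count is the number of client sets containing it.
--     return {f: sum(f in s for s in client_sets) for f in order}
-- ===== Notes on version B (the rewrite author's own statement) =====
-- stated objective: alternative
-- what changed: Instead of A's single interleaved pass that threads a running counter dict and a per-client seen-set, B first materialises every client's feature set and the global first-appearance feature order, then computes each feature's count independently as the number of client sets it belongs to (membership queries, no running counter).
import Mathlib
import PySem

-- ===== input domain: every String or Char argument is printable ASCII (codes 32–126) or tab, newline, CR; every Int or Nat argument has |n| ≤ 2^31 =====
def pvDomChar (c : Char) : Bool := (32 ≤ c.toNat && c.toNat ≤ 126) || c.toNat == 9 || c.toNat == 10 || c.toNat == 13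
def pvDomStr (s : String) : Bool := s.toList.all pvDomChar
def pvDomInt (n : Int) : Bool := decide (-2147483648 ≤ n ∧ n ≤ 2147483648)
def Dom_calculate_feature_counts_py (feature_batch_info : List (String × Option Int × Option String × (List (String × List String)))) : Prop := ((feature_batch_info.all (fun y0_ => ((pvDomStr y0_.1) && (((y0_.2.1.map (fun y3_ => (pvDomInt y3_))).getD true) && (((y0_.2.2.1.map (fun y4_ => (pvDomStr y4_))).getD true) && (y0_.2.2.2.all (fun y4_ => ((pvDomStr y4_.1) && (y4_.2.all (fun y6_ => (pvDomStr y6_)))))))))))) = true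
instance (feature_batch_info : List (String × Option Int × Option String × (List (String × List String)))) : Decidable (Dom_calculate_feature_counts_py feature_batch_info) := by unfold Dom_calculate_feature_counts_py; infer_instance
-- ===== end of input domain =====

-- B drops A's single interleaved pass (running counter dict + per-client seen-set) for a staged
-- scheme: per-client feature sets and the global first-appearance order are built first, then each
-- feature's count is computed independently by membership in the client sets; same results, an
-- alternative decomposition (no speed claim).

-- ===== PORT A =====
-- Literal port of A: feature_count is a dict threaded through the outer loop; per client a fresh
-- set client_feature_names guards the increment feature by feature.
def calculate_feature_counts_py (feature_batch_info : List (String × Option Int × Option String × (List (String × List String)))) : List (String × Int) :=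
  (feature_batch_info.foldl
    (fun (feature_count : PySem.Dict String Int) info =>
      ((PySem.Dict.ofList info.2.2.2).values.foldl
        (fun (st : PySem.Dict String Int × PySem.Set String) features =>
          features.foldl
            (fun st feature =>
              if PySem.Set.contains st.2 feature then st
              else (st.1.insert feature (st.1.getD feature 0 + 1), PySem.Set.add st.2 feature))
            st)
        (feature_count, PySem.Set.empty)).1)
    PySem.Dict.empty).items

-- ===== PORT B =====
-- Literal port of B: client_sets (one set per client), order (dict.fromkeys = ordered dedup over
-- the whole input), then a comprehension pairing each feature with its membership count.
def calculate_feature_counts_py_alt (feature_batch_info : List (String × Option Int × Option String × (List (String × List String)))) : List (String × Int) :=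
  let client_sets :=
    feature_batch_info.map
      (fun info => PySem.Set.ofList ((PySem.Dict.ofList info.2.2.2).values.flatMap id))
  let order :=
    PySem.List.dedup
      (feature_batch_info.flatMap (fun info => (PySem.Dict.ofList info.2.2.2).values.flatMap id))
  order.map (fun f =>
    (f, (client_sets.map (fun s => if PySem.Set.contains s f then (1 : Int) else 0)).sum))

-- ===== PRECONDITION & SPEC =====
def Spec_calculate_feature_counts_py (feature_batch_info : List (String × Option Int × Option String × (List (String × List String)))) (out : List (String × Int)) : Prop := out = calculate_feature_counts_py_alt feature_batch_info
instance (feature_batch_info : List (String × Option Int × Option String × (List (String × List String)))) (out : List (String × Int)) : Decidable (Spec_calculate_feature_counts_py feature_batch_info out) := by unfold Spec_calculate_feature_counts_py; infer_instance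

-- ===== CLAIM (what is proved, stated in full; the proofs are below) =====
def Claim_equal_calculate_feature_counts_py : Prop := ∀ (feature_batch_info : List (String × Option Int × Option String × (List (String × List String)))), Dom_calculate_feature_counts_py feature_batch_info → Spec_calculate_feature_counts_py feature_batch_info (calculate_feature_counts_py feature_batch_info)

-- ===== LEMMAS AND PROOFS =====

def pvStepA (st : PySem.Dict String Int × PySem.Set String) (feature : String) :
    PySem.Dict String Int × PySem.Set String :=
  if PySem.Set.contains st.2 feature then st
  else (st.1.insert feature (st.1.getD feature 0 + 1), PySem.Set.add st.2 feature)

def pvStepB (d : PySem.Dict String Int) (x : String) : PySem.Dict String Int :=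
  d.insert x (d.getD x 0 + 1)

def pvDedupFrom (seen : PySem.Set String) : List String → List String
  | [] => []
  | f :: fs =>
      if PySem.Set.contains seen f then pvDedupFrom seen fs
      else f :: pvDedupFrom (PySem.Set.add seen f) fs

theorem pvFoldl_stepA (feats : List String) (fc : PySem.Dict String Int)
    (seen : PySem.Set String) :
    (feats.foldl pvStepA (fc, seen)).1 = (pvDedupFrom seen feats).foldl pvStepB fc := by
  induction feats generalizing fc seen with
  | nil => rfl
  | cons f fs ih =>
    by_cases h : f ∈ seen
    · simp [pvStepA, pvDedupFrom, h, ih]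
    · simp only [List.foldl_cons]
      rw [ih]
      simp [pvStepA, pvDedupFrom, pvStepB, h]

theorem pvFoldl_add_append (feats : List String) (seen : PySem.Set String) :
    feats.foldl PySem.Set.add seen = seen ++ pvDedupFrom seen feats := by
  induction feats generalizing seen with
  | nil => simp [pvDedupFrom]
  | cons f fs ih =>
    by_cases h : f ∈ seen
    · simp [pvDedupFrom, h, ih, PySem.Set.add]
    · simp [pvDedupFrom, h, ih, PySem.Set.add]

theorem pvDedupFrom_empty (feats : List String) :
    pvDedupFrom PySem.Set.empty feats = PySem.List.dedup feats := by
  have := pvFoldl_add_append feats PySem.Set.empty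
  simp [PySem.Set.empty] at this
  rw [PySem.List.dedup_eq_ofList, PySem.Set.ofList_eq_foldl]
  simpa [PySem.Set.empty] using this.symm

theorem pvFoldl_flat (vals : List (List String)) (st : PySem.Dict String Int × PySem.Set String) :
    vals.foldl (fun st features => features.foldl pvStepA st) st
      = (vals.flatMap id).foldl pvStepA st := by
  induction vals generalizing st with
  | nil => rfl
  | cons v vs ih => simp [List.flatMap_cons, List.foldl_append, ih]

-- folding "insert x (getD x 0 + 1)" over a duplicate-free list, item-level view
theorem pvItems_foldl_stepB (xs : List String) (d : PySem.Dict String Int)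
    (hx : xs.Nodup) (hd : d.keys.Nodup) :
    (xs.foldl pvStepB d).items
      = d.items.map (fun p => (p.1, p.2 + if p.1 ∈ xs then 1 else 0))
        ++ (xs.filter (fun x => !d.contains x)).map (fun x => (x, (1 : Int))) := by
  induction xs generalizing d with
  | nil => simp
  | cons x xs ih =>
    have hxs : xs.Nodup := hx.of_cons
    have hxmem : x ∉ xs := (List.nodup_cons.mp hx).1
    have hd1 : (pvStepB d x).keys.Nodup := PySem.Dict.nodup_keys_insert d x _ hd
    have hfilter : xs.filter (fun y => !(pvStepB d x).contains y)
        = xs.filter (fun y => !d.contains y) := by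
      apply List.filter_congr
      intro y hy
      have hyx : y ≠ x := fun h => hxmem (h ▸ hy)
      simp [pvStepB, PySem.Dict.contains_insert, hyx]
    simp only [List.foldl_cons]
    rw [ih (pvStepB d x) hxs hd1, hfilter]
    by_cases hc : d.contains x = true
    · -- x already a key: items updated in place
      have hitems : (pvStepB d x).items
          = d.items.map (fun p => if (p.1 == x) = true then (x, d.getD x 0 + 1) else p) :=
        PySem.Dict.items_insert_of_contains d _ hc
      have hfx : (x :: xs).filter (fun y => !d.contains y)
          = xs.filter (fun y => !d.contains y) := by
        simp [hc]
      rw [hitems, hfx, List.map_map]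
      congr 1
      apply List.map_congr_left
      intro p hp
      by_cases hpx : p.1 = x
      · have hmem : (x, p.2) ∈ d.items := by rw [← hpx]; simpa using hp
        have hval : d.getD x 0 = p.2 := PySem.Dict.getD_of_mem_items d hmem hd 0
        simp [Function.comp, hpx, hval, hxmem]
      · simp [Function.comp, hpx, List.mem_cons]
    · -- x fresh: appended with value 1
      have hc' : d.contains x = false := by simpa using hc
      have hitems : (pvStepB d x).items = d.items ++ [(x, (1 : Int))] := by
        show (d.insert x (d.getD x 0 + 1)).items = _
        rw [PySem.Dict.items_insert_of_not_contains d _ hc',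
          PySem.Dict.getD_of_not_contains d 0 hc']
        norm_num
      have hkx : ∀ p ∈ d.items, p.1 ≠ x := by
        intro p hp h
        have hk : p.1 ∈ d.keys := List.mem_map_of_mem hp
        rw [h] at hk
        rw [(PySem.Dict.contains_iff_mem_keys d x).mpr hk] at hc'
        exact Bool.noConfusion hc'
      have hfx : (x :: xs).filter (fun y => !d.contains y)
          = x :: xs.filter (fun y => !d.contains y) := by
        simp [hc']
      rw [hitems, hfx]
      simp only [List.map_append, List.map_cons, List.map_nil, List.append_assoc]
      congr 1
      · apply List.map_congr_left
        intro p hp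
        have := hkx p hp
        simp [this]
      · simp [hxmem]

-- the A-side loop over the per-client feature lists, characterised item by item:
-- keys in global first-appearance order, each paired with the number of clients containing it
theorem pvCore_items (Ls : List (List String)) :
    (Ls.foldl (fun d l => (PySem.List.dedup l).foldl pvStepB d) PySem.Dict.empty).items
      = (PySem.List.dedup Ls.flatten).map
          (fun f => (f, ((Ls.countP (fun l => f ∈ l)) : Int))) := by
  induction Ls using List.reverseRecOn with
  | nil => simp [PySem.Dict.empty, PySem.List.dedup]
  | append_singleton Ls l ih =>
    rw [List.foldl_append, List.foldl_cons, List.foldl_nil]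
    have hkeys : (Ls.foldl (fun d l => (PySem.List.dedup l).foldl pvStepB d) PySem.Dict.empty).keys
        = PySem.List.dedup Ls.flatten := by
      simp only [PySem.Dict.keys, ih, List.map_map]
      rw [show ((fun (x : String × Int) => x.1) ∘ (fun f => (f, ((Ls.countP (fun l => f ∈ l)) : Int)))) = id from rfl, List.map_id]
    have hnd : (Ls.foldl (fun d l => (PySem.List.dedup l).foldl pvStepB d) PySem.Dict.empty).keys.Nodup := by
      rw [hkeys]; exact PySem.List.nodup_dedup _
    rw [pvItems_foldl_stepB _ _ (PySem.List.nodup_dedup l) hnd, ih, List.map_map]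
    have hF : (Ls ++ [l]).flatten = Ls.flatten ++ l := by simp
    have hsplit : PySem.List.dedup (Ls.flatten ++ l)
        = PySem.List.dedup Ls.flatten
          ++ (PySem.List.dedup l).filter
              (fun y => !(PySem.Set.contains (PySem.List.dedup Ls.flatten) y)) := by
      simp only [PySem.List.dedup_eq_ofList]
      rw [PySem.Set.ofList_append, PySem.Set.update_eq_append_filter]
    rw [hF, hsplit, List.map_append]
    congr 1
    · -- updated old entries
      apply List.map_congr_left
      intro f _
      simp only [Function.comp, List.countP_append, PySem.List.mem_dedup]
      have : Ls.countP (fun l' => f ∈ l') + [l].countP (fun l' => f ∈ l')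
          = Ls.countP (fun l' => f ∈ l') + (if f ∈ l then 1 else 0) := by
        simp [List.countP_cons]
      rw [this]
      split_ifs with h <;> simp
    · -- freshly appended entries
      have hfilter : (PySem.List.dedup l).filter
            (fun x => !(Ls.foldl (fun d l => (PySem.List.dedup l).foldl pvStepB d) PySem.Dict.empty).contains x)
          = (PySem.List.dedup l).filter
              (fun y => !(PySem.Set.contains (PySem.List.dedup Ls.flatten) y)) := by
        apply List.filter_congr
        intro y _
        rw [PySem.Dict.contains_eq_decide_mem_keys, hkeys]
        congr 1
        simp
      rw [hfilter]
      apply List.map_congr_left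
      intro y hy
      rw [List.mem_filter] at hy
      obtain ⟨hyl, hyc⟩ := hy
      have hyF : y ∉ Ls.flatten := by
        intro hmem
        simp [hmem] at hyc
      have hzero : Ls.countP (fun l' => y ∈ l') = 0 := by
        rw [List.countP_eq_zero]
        intro l' hl'
        simp only [decide_eq_true_eq]
        intro hyl'
        exact hyF (List.mem_flatten.mpr ⟨l', hl', hyl'⟩)
      have hone : [l].countP (fun l' => y ∈ l') = 1 := by
        have : y ∈ l := by simpa [PySem.List.mem_dedup] using hyl
        simp [this]
      simp [List.countP_append, hzero, hone]

-- ===== VERDICT (by name: the statement is the Claim_ definition above) =====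
theorem calculate_feature_counts_py_spec : Claim_equal_calculate_feature_counts_py := by
  intro fbi _
  unfold Spec_calculate_feature_counts_py calculate_feature_counts_py calculate_feature_counts_py_alt
  have hA : ∀ (fc : PySem.Dict String Int) (info : String × Option Int × Option String × (List (String × List String))),
      ((PySem.Dict.ofList info.2.2.2).values.foldl
        (fun (st : PySem.Dict String Int × PySem.Set String) features =>
          features.foldl
            (fun st feature =>
              if PySem.Set.contains st.2 feature then st
              else (st.1.insert feature (st.1.getD feature 0 + 1), PySem.Set.add st.2 feature))
            st)
        (fc, PySem.Set.empty)).1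
      = (PySem.List.dedup ((PySem.Dict.ofList info.2.2.2).values.flatMap id)).foldl pvStepB fc := by
    intro fc info
    show ((PySem.Dict.ofList info.2.2.2).values.foldl
        (fun st features => features.foldl pvStepA st) (fc, PySem.Set.empty)).1 = _
    rw [pvFoldl_flat, pvFoldl_stepA, pvDedupFrom_empty]
  simp only [hA]
  rw [← List.foldl_map (f := fun (info : String × Option Int × Option String × (List (String × List String))) => (PySem.Dict.ofList info.2.2.2).values.flatMap id)
        (g := fun (d : PySem.Dict String Int) l => (PySem.List.dedup l).foldl pvStepB d)]
  rw [pvCore_items, List.flatMap_def]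
  apply List.map_congr_left
  intro f _
  congr 1
  rw [List.map_map]
  simp only [Function.comp_def]
  rw [PySem.List.sum_map_ite_one_zero
        (fun info => PySem.Set.contains (PySem.Set.ofList ((PySem.Dict.ofList info.2.2.2).values.flatMap id)) f) fbi]
  rw [List.countP_map]
  exact congrArg _ (List.countP_congr (fun info _ => by simp))
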